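-- pv_equiv track=rewrite | github.com/Bighaohaohao/AI_Test | services/ai_service.py | _generate_example_cases
-- ===== SOURCE A (Python) =====
-- from typing import List, Dict, Any
--
-- def _generate_example_cases(requirement_text: str, normal_count: int, abnormal_count: int, test_types: List[str]) -> List[Dict]:
--     """生成示例用例数据"""
--     cases = []
--     case_id = 1
--
--     for test_type in test_types:
--         # 正常用例
--         for i in range(normal_count):
--             cases.append({
--                 "case_id": f"TC{case_id:03d}",
--                 "module": "示例模块",
--                 "case_name": f"{test_type}_正常用例_{i+1}",
--                 "precondition": "系统正常运行，用户已登录",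
--                 "steps": f"1. 进入功能页面\n2. 执行正常操作步骤{i+1}\n3. 验证结果",
--                 "expected_result": "操作成功，显示正确结果",
--                 "priority": "P1",
--                 "case_type": test_type,
--                 "status": "pending"  # 默认为待执行
--             })
--             case_id += 1
--
--         # 异常用例
--         for i in range(abnormal_count):
--             cases.append({
--                 "case_id": f"TC{case_id:03d}",
--                 "module": "示例模块",
--                 "case_name": f"{test_type}_异常用例_{i+1}",
--                 "precondition": "系统正常运行",
--                 "steps": f"1. 进入功能页面\n2. 执行异常操作步骤{i+1}\n3. 验证错误处理",
--                 "expected_result": "系统正确处理异常，显示友好错误提示",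
--                 "priority": "P2",
--                 "case_type": test_type,
--                 "status": "pending"  # 默认为待执行
--             })
--             case_id += 1
--
--     return cases
-- ===== SOURCE B (Python) =====
-- from typing import List, Dict
--
-- def _generate_example_cases(requirement_text: str, normal_count: int, abnormal_count: int, test_types: List[str]) -> List[Dict]:
--     """Two-phase build: descriptors first, then one enumerate pass derives case_id."""
--     descs = []
--     for test_type in test_types:
--         for i in range(normal_count):
--             descs.append((
--                 f"{test_type}_正常用例_{i+1}",
--                 "系统正常运行，用户已登录",
--                 f"1. 进入功能页面\n2. 执行正常操作步骤{i+1}\n3. 验证结果",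
--                 "操作成功，显示正确结果",
--                 "P1",
--                 test_type,
--             ))
--         for i in range(abnormal_count):
--             descs.append((
--                 f"{test_type}_异常用例_{i+1}",
--                 "系统正常运行",
--                 f"1. 进入功能页面\n2. 执行异常操作步骤{i+1}\n3. 验证错误处理",
--                 "系统正确处理异常，显示友好错误提示",
--                 "P2",
--                 test_type,
--             ))
--     return [
--         {
--             "case_id": f"TC{idx+1:03d}",
--             "module": "示例模块",
--             "case_name": name,
--             "precondition": pre,
--             "steps": steps,
--             "expected_result": exp,
--             "priority": prio,
--             "case_type": ct,
--             "status": "pending",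
--         }
--         for idx, (name, pre, steps, exp, prio, ct) in enumerate(descs)
--     ]
-- ===== Notes on version B (the rewrite author's own statement) =====
-- stated objective: alternative
-- what changed: B first builds a list of per-case descriptors (only the varying fields) with nested loops, then a single enumerate pass produces the final dicts, deriving case_id from the enumeration index instead of a mutated running counter.
import Mathlib
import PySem

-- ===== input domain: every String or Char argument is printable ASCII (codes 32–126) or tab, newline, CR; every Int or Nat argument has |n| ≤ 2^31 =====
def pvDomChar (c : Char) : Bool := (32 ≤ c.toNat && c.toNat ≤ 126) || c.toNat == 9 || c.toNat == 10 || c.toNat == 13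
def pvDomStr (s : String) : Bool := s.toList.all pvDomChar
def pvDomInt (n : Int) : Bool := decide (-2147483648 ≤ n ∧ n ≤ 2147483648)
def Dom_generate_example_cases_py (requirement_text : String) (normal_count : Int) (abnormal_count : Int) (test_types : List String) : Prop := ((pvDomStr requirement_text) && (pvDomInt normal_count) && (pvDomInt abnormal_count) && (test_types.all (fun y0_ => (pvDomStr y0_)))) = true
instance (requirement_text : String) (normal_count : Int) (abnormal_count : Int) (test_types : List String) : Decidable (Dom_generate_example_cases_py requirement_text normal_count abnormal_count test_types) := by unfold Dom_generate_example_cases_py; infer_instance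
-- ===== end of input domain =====

-- B builds the per-case descriptors first and derives case_id in one enumerate pass,
-- replacing A's mutated running counter (objective: alternative decomposition, same cost).

-- ===== PORT A =====
-- f"TC{case_id:03d}": case_id formatted via str(n).zfill(3), identical to %03d on the ints reached here
def pvRowNorm (t : String) (cid : Int) (i : Int) : List (String × String) :=
  [("case_id", "TC" ++ PySem.Str.zfill (PySem.Int.toStr cid) 3),
   ("module", "示例模块"),
   ("case_name", t ++ "_正常用例_" ++ PySem.Int.toStr (i + 1)),
   ("precondition", "系统正常运行，用户已登录"),
   ("steps", "1. 进入功能页面\n2. 执行正常操作步骤" ++ PySem.Int.toStr (i + 1) ++ "\n3. 验证结果"),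
   ("expected_result", "操作成功，显示正确结果"),
   ("priority", "P1"),
   ("case_type", t),
   ("status", "pending")]

def pvRowAbn (t : String) (cid : Int) (i : Int) : List (String × String) :=
  [("case_id", "TC" ++ PySem.Str.zfill (PySem.Int.toStr cid) 3),
   ("module", "示例模块"),
   ("case_name", t ++ "_异常用例_" ++ PySem.Int.toStr (i + 1)),
   ("precondition", "系统正常运行"),
   ("steps", "1. 进入功能页面\n2. 执行异常操作步骤" ++ PySem.Int.toStr (i + 1) ++ "\n3. 验证错误处理"),
   ("expected_result", "系统正确处理异常，显示友好错误提示"),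
   ("priority", "P2"),
   ("case_type", t),
   ("status", "pending")]

def generate_example_cases_py (requirement_text : String) (normal_count : Int) (abnormal_count : Int) (test_types : List String) : List (List (String × String)) :=
  (test_types.foldl
    (fun (st : List (List (String × String)) × Int) t =>
      let st1 := (PySem.List.pyRange 0 normal_count 1).foldl
        (fun (s : List (List (String × String)) × Int) i => (s.1 ++ [pvRowNorm t s.2 i], s.2 + 1)) st
      (PySem.List.pyRange 0 abnormal_count 1).foldl
        (fun (s : List (List (String × String)) × Int) i => (s.1 ++ [pvRowAbn t s.2 i], s.2 + 1)) st1)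
    ([], 1)).1

-- ===== PORT B =====
-- descriptor: (case_name, precondition, steps, expected_result, priority, case_type)
def pvDescNorm (t : String) (i : Int) : String × String × String × String × String × String :=
  (t ++ "_正常用例_" ++ PySem.Int.toStr (i + 1),
   "系统正常运行，用户已登录",
   "1. 进入功能页面\n2. 执行正常操作步骤" ++ PySem.Int.toStr (i + 1) ++ "\n3. 验证结果",
   "操作成功，显示正确结果",
   "P1", t)

def pvDescAbn (t : String) (i : Int) : String × String × String × String × String × String :=
  (t ++ "_异常用例_" ++ PySem.Int.toStr (i + 1),
   "系统正常运行",
   "1. 进入功能页面\n2. 执行异常操作步骤" ++ PySem.Int.toStr (i + 1) ++ "\n3. 验证错误处理",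
   "系统正确处理异常，显示友好错误提示",
   "P2", t)

def pvDescs (normal_count : Int) (abnormal_count : Int) (test_types : List String) : List (String × String × String × String × String × String) :=
  test_types.foldl
    (fun acc t =>
      (PySem.List.pyRange 0 abnormal_count 1).foldl (fun a i => a ++ [pvDescAbn t i])
        ((PySem.List.pyRange 0 normal_count 1).foldl (fun a i => a ++ [pvDescNorm t i]) acc))
    []

def pvFinalize (idx : Int) (d : String × String × String × String × String × String) : List (String × String) :=
  [("case_id", "TC" ++ PySem.Str.zfill (PySem.Int.toStr (idx + 1)) 3),
   ("module", "示例模块"),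
   ("case_name", d.1),
   ("precondition", d.2.1),
   ("steps", d.2.2.1),
   ("expected_result", d.2.2.2.1),
   ("priority", d.2.2.2.2.1),
   ("case_type", d.2.2.2.2.2),
   ("status", "pending")]

def generate_example_cases_py_alt (requirement_text : String) (normal_count : Int) (abnormal_count : Int) (test_types : List String) : List (List (String × String)) :=
  (PySem.List.enumerate (pvDescs normal_count abnormal_count test_types) 0).map (fun p => pvFinalize p.1 p.2)

-- ===== PRECONDITION & SPEC =====
def Spec_generate_example_cases_py (requirement_text : String) (normal_count : Int) (abnormal_count : Int) (test_types : List String) (out : List (List (String × String))) : Prop := out = generate_example_cases_py_alt requirement_text normal_count abnormal_count test_types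
instance (requirement_text : String) (normal_count : Int) (abnormal_count : Int) (test_types : List String) (out : List (List (String × String))) : Decidable (Spec_generate_example_cases_py requirement_text normal_count abnormal_count test_types out) := by unfold Spec_generate_example_cases_py; infer_instance

-- ===== CLAIM (what is proved, stated in full; the proofs are below) =====
def Claim_equal_generate_example_cases_py : Prop := ∀ (requirement_text : String) (normal_count : Int) (abnormal_count : Int) (test_types : List String), Dom_generate_example_cases_py requirement_text normal_count abnormal_count test_types → Spec_generate_example_cases_py requirement_text normal_count abnormal_count test_types (generate_example_cases_py requirement_text normal_count abnormal_count test_types)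

-- ===== LEMMAS AND PROOFS =====

theorem pvRowNorm_eq_finalize (t : String) (k i : Int) :
    pvRowNorm t (k + 1) i = pvFinalize k (pvDescNorm t i) := by
  simp [pvRowNorm, pvFinalize, pvDescNorm]

theorem pvRowAbn_eq_finalize (t : String) (k i : Int) :
    pvRowAbn t (k + 1) i = pvFinalize k (pvDescAbn t i) := by
  simp [pvRowAbn, pvFinalize, pvDescAbn]

-- the appending inner loop keeps the invariant "state = (finalized enumerate of descriptors, count+1)"
theorem pv_inner_fold
    (row : Int → Int → List (String × String))
    (g : Int → String × String × String × String × String × String)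
    (h : ∀ (k : Int) (i : Int), row (k + 1) i = pvFinalize k (g i)) :
    ∀ (l : List Int) (ds : List (String × String × String × String × String × String)),
      l.foldl (fun (s : List (List (String × String)) × Int) i => (s.1 ++ [row s.2 i], s.2 + 1))
        ((PySem.List.enumerate ds 0).map (fun p => pvFinalize p.1 p.2), (ds.length : Int) + 1)
      = ((PySem.List.enumerate (l.foldl (fun a i => a ++ [g i]) ds) 0).map (fun p => pvFinalize p.1 p.2),
         ((l.foldl (fun a i => a ++ [g i]) ds).length : Int) + 1) := by
  intro l
  induction l with
  | nil => intro ds; simp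
  | cons x xs ih =>
    intro ds
    have e1 : (PySem.List.enumerate ds 0).map (fun p => pvFinalize p.1 p.2) ++ [row ((ds.length : Int) + 1) x]
        = (PySem.List.enumerate (ds ++ [g x]) 0).map (fun p => pvFinalize p.1 p.2) := by
      rw [PySem.List.enumerate_append]
      simp [h, PySem.List.enumerate]
    have e2 : ((ds.length : Int) + 1) + 1 = (((ds ++ [g x]).length : Int)) + 1 := by
      simp
    simp only [List.foldl_cons]
    rw [e1, e2]
    exact ih (ds ++ [g x])

theorem pv_outer_fold (normal_count abnormal_count : Int) :
    ∀ (tts : List String) (ds : List (String × String × String × String × String × String)),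
      tts.foldl
        (fun (st : List (List (String × String)) × Int) t =>
          let st1 := (PySem.List.pyRange 0 normal_count 1).foldl
            (fun (s : List (List (String × String)) × Int) i => (s.1 ++ [pvRowNorm t s.2 i], s.2 + 1)) st
          (PySem.List.pyRange 0 abnormal_count 1).foldl
            (fun (s : List (List (String × String)) × Int) i => (s.1 ++ [pvRowAbn t s.2 i], s.2 + 1)) st1)
        ((PySem.List.enumerate ds 0).map (fun p => pvFinalize p.1 p.2), (ds.length : Int) + 1)
      = ((PySem.List.enumerate
            (tts.foldl
              (fun acc t =>
                (PySem.List.pyRange 0 abnormal_count 1).foldl (fun a i => a ++ [pvDescAbn t i])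
                  ((PySem.List.pyRange 0 normal_count 1).foldl (fun a i => a ++ [pvDescNorm t i]) acc))
              ds) 0).map (fun p => pvFinalize p.1 p.2),
         ((tts.foldl
              (fun acc t =>
                (PySem.List.pyRange 0 abnormal_count 1).foldl (fun a i => a ++ [pvDescAbn t i])
                  ((PySem.List.pyRange 0 normal_count 1).foldl (fun a i => a ++ [pvDescNorm t i]) acc))
              ds).length : Int) + 1) := by
  intro tts
  induction tts with
  | nil => intro ds; rfl
  | cons t ts ih =>
    intro ds
    simp only [List.foldl_cons]
    rw [pv_inner_fold (pvRowNorm t) (pvDescNorm t) (fun k i => pvRowNorm_eq_finalize t k i),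
        pv_inner_fold (pvRowAbn t) (pvDescAbn t) (fun k i => pvRowAbn_eq_finalize t k i)]
    exact ih _

-- ===== VERDICT (by name: the statement is the Claim_ definition above) =====
theorem generate_example_cases_py_spec : Claim_equal_generate_example_cases_py := by
  intro requirement_text normal_count abnormal_count test_types _
  unfold Spec_generate_example_cases_py generate_example_cases_py generate_example_cases_py_alt pvDescs
  have h0 : (([], 1) : List (List (String × String)) × Int)
      = ((PySem.List.enumerate ([] : List (String × String × String × String × String × String)) 0).map (fun p => pvFinalize p.1 p.2),
         ((([] : List (String × String × String × String × String × String)).length : Int) + 1)) := by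
    simp [PySem.List.enumerate]
  rw [h0, pv_outer_fold normal_count abnormal_count test_types []]
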